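-- pv_equiv track=rewrite | github.com/xbash/INS121-PR1-UNAB | 07_listas/iguales_o_distintos.py | todos_distintos
-- ===== SOURCE A (Python) =====
-- def todos_distintos(lista):
--     aux = []
--     retorno = True
--     for i in lista:
--         if i in aux:
--             retorno = False
--         else:
--             aux.append(i)
--     return retorno
-- ===== SOURCE B (Python) =====
-- def todos_distintos(lista):
--     return all(lista.count(x) == 1 for x in lista)
-- ===== Notes on version B (the rewrite author's own statement) =====
-- stated objective: idiomatic
-- what changed: Instead of a loop maintaining a growing 'seen' list with membership tests and a sticky False flag, B checks with all() that each element's total count in the whole list is exactly 1; all() also short-circuits at the first repeated element where A always scans the whole list.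
import Mathlib
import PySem

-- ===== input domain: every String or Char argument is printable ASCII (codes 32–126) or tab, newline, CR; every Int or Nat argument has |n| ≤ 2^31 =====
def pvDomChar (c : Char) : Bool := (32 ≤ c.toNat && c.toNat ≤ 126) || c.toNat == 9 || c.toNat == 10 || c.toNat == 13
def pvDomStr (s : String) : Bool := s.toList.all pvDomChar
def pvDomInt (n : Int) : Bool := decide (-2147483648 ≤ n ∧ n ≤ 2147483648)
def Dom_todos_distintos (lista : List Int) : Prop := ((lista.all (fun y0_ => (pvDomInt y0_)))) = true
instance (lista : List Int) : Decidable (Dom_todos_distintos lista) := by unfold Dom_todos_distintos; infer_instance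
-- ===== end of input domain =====

-- B checks that every element occurs exactly once via all()/count, instead of A's seen-list loop; same O(n^2) cost, more idiomatic.

-- ===== PORT A =====
-- the for-loop of A over (aux, retorno)
def todosDistintosLoop : List Int → List Int → Bool → Bool
  | [], _, retorno => retorno
  | i :: t, aux, retorno =>
      if aux.contains i then todosDistintosLoop t aux false
      else todosDistintosLoop t (aux ++ [i]) retorno

def todos_distintos (lista : List Int) : Bool :=
  todosDistintosLoop lista [] true

-- ===== PORT B =====
def todos_distintos_alt (lista : List Int) : Bool :=
  lista.all (fun x => PySem.List.count lista x == 1)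

-- ===== PRECONDITION & SPEC =====
def Spec_todos_distintos (lista : List Int) (out : Bool) : Prop := out = todos_distintos_alt lista
instance (lista : List Int) (out : Bool) : Decidable (Spec_todos_distintos lista out) := by unfold Spec_todos_distintos; infer_instance

-- ===== CLAIM (what is proved, stated in full; the proofs are below) =====
def Claim_equal_todos_distintos : Prop := ∀ (lista : List Int), Dom_todos_distintos lista → Spec_todos_distintos lista (todos_distintos lista)

-- ===== LEMMAS AND PROOFS =====

theorem loop_false (l aux : List Int) : todosDistintosLoop l aux false = false := by
  induction l generalizing aux with
  | nil => rfl
  | cons i t ih =>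
      simp only [todosDistintosLoop]
      split <;> exact ih _

theorem loop_true (l aux : List Int) :
    todosDistintosLoop l aux true = decide (l.Nodup ∧ ∀ x ∈ l, x ∉ aux) := by
  induction l generalizing aux with
  | nil => simp [todosDistintosLoop]
  | cons i t ih =>
      simp only [todosDistintosLoop]
      by_cases h : i ∈ aux
      · rw [if_pos (by simpa using h), loop_false]
        refine (decide_eq_false ?_).symm
        rintro ⟨-, hall⟩
        exact hall i (by simp) h
      · rw [if_neg (by simpa using h), ih]
        apply decide_eq_decide.mpr
        simp only [List.nodup_cons, List.mem_append, List.mem_cons, List.not_mem_nil, or_false]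
        constructor
        · rintro ⟨hn, hall⟩
          refine ⟨⟨fun hm => (hall i hm) (Or.inr rfl), hn⟩, fun x hx => ?_⟩
          rcases hx with rfl | hx
          · exact h
          · exact fun hm => hall x hx (Or.inl hm)
        · rintro ⟨⟨hni, hn⟩, hall⟩
          refine ⟨hn, fun x hx hm => ?_⟩
          rcases hm with hm | rfl
          · exact hall x (Or.inr hx) hm
          · exact hni hx

-- ===== VERDICT (by name: the statement is the Claim_ definition above) =====
theorem todos_distintos_spec : Claim_equal_todos_distintos := by
  intro lista _
  unfold Spec_todos_distintos todos_distintos todos_distintos_alt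
  rw [loop_true, Bool.eq_iff_iff]
  simp [PySem.List.count_eq, List.nodup_iff_count_eq_one]
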